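-- pv_equiv track=rewrite | github.com/jim-donovan/DI-agent-2 | ui.py | _extract_score_from_summary
-- ===== SOURCE A (Python) =====
-- def _extract_score_from_summary(content: str, provider: str) -> str:
--     """Extract score from evaluation comparison summary section."""
--     lines = content.split('\n')
--
--     # Look for the specific evaluation sections in the report
--     in_provider_section = False
--
--     for line in lines:
--         # Check if we're in the right evaluation section
--         if provider.upper() in line and "EVALUATION" in line:
--             in_provider_section = True
--             continue
--         elif in_provider_section and ("=" in line and len(line.strip()) > 10 and line.strip().count("=") > 10):
--             # We've hit another section separator
--             in_provider_section = False
--             continue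
--
--         # If we're in the right section, look for score
--         if in_provider_section and "Score:" in line:
--             try:
--                 # Handle formats like "Score: 85.0/100"
--                 score_part = line.split("Score:")[1].strip()
--                 score = score_part.split('/')[0].strip()
--                 return f"{score}/100"
--             except Exception as e:
--                 continue
--
--     return "N/A"
-- ===== SOURCE B (Python) =====
-- def _is_header(key, line):
--     return key in line and "EVALUATION" in line
--
--
-- def _is_sep(line):
--     return "=" in line and len(line.strip()) > 10 and line.strip().count("=") > 10
--
--
-- def _score_of(line):
--     if "Score:" not in line:
--         return None
--     score_part = line.split("Score:")[1].strip()
--     score = score_part.split('/')[0].strip()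
--     return f"{score}/100"
--
--
-- def _extract_score_from_summary(content: str, provider: str) -> str:
--     """Extract score from evaluation comparison summary section."""
--     lines = content.split('\n')
--     key = provider.upper()
--     n = len(lines)
--     i = 0
--     while True:
--         # phase 1: find the next evaluation header for this provider
--         while i < n and not _is_header(key, lines[i]):
--             i += 1
--         if i >= n:
--             return "N/A"
--         i += 1
--         # phase 2: scan the section body
--         while i < n:
--             line = lines[i]
--             i += 1
--             if _is_header(key, line):
--                 continue
--             if _is_sep(line):
--                 break  # section ended; resume header search
--             r = _score_of(line)
--             if r is not None:
--                 return r
--         else: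
--             return "N/A"
-- ===== Notes on version B (the rewrite author's own statement) =====
-- stated objective: alternative
-- what changed: Replaces A's single flag-carrying loop with a two-phase state machine (explicit header-search loop and section-body-scan loop, with helper predicates for header/separator/score lines) that alternates phases instead of threading a boolean through one loop.
import Mathlib
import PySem

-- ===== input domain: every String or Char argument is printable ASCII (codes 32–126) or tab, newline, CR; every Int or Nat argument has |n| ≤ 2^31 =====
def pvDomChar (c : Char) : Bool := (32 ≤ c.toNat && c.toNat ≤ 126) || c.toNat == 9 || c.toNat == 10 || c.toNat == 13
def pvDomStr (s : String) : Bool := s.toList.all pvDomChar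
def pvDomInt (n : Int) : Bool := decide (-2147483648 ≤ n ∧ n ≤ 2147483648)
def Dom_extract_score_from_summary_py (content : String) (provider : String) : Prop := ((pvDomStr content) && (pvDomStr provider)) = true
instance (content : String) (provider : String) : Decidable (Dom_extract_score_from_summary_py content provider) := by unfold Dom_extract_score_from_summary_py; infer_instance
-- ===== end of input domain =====

-- B replaces A's flag-carrying single loop with a two-phase state machine (header search / section-body scan); alternative decomposition, same cost.

-- ===== PORT A =====
-- A's try/except around the parse is ported as a match: a failing index falls through to the next line, as `continue` does.
def pvLoopA (provider : String) : List String → Bool → String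
  | [], _ => "N/A"
  | line :: rest, flag =>
    if PySem.Str.isIn (PySem.Str.upper provider) line && PySem.Str.isIn "EVALUATION" line then
      pvLoopA provider rest true
    else if flag && (PySem.Str.isIn "=" line &&
        decide (10 < PySem.Str.len (PySem.Str.strip line)) &&
        decide (10 < PySem.Str.count (PySem.Str.strip line) "=")) then
      pvLoopA provider rest false
    else if flag && PySem.Str.isIn "Score:" line then
      match PySem.List.pyGet? ((PySem.Str.split? line "Score:").getD []) 1 with
      | none => pvLoopA provider rest flag
      | some part =>
        match PySem.List.pyGet? ((PySem.Str.split? (PySem.Str.strip part) "/").getD []) 0 with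
        | none => pvLoopA provider rest flag
        | some score => PySem.Str.strip score ++ "/100"
    else pvLoopA provider rest flag

def extract_score_from_summary_py (content : String) (provider : String) : String :=
  pvLoopA provider ((PySem.Str.split? content "\n").getD []) false

-- ===== PORT B =====
def pvIsHeader (key : String) (line : String) : Bool :=
  PySem.Str.isIn key line && PySem.Str.isIn "EVALUATION" line

def pvIsSep (line : String) : Bool :=
  PySem.Str.isIn "=" line && decide (10 < PySem.Str.len (PySem.Str.strip line)) &&
    decide (10 < PySem.Str.count (PySem.Str.strip line) "=")

def pvScoreOf (line : String) : Option String :=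
  if PySem.Str.isIn "Score:" line then
    match PySem.List.pyGet? ((PySem.Str.split? line "Score:").getD []) 1 with
    | none => none
    | some part =>
      match PySem.List.pyGet? ((PySem.Str.split? (PySem.Str.strip part) "/").getD []) 0 with
      | none => none
      | some score => some (PySem.Str.strip score ++ "/100")
  else none

mutual
-- phase 1: look for the next provider-evaluation header
def pvFindHeader (key : String) : List String → String
  | [] => "N/A"
  | l :: ls => if pvIsHeader key l then pvScanBody key ls else pvFindHeader key ls
-- phase 2: scan the section body for a score line
def pvScanBody (key : String) : List String → String
  | [] => "N/A"
  | l :: ls =>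
    if pvIsHeader key l then pvScanBody key ls
    else if pvIsSep l then pvFindHeader key ls
    else match pvScoreOf l with
      | some r => r
      | none => pvScanBody key ls
end

def extract_score_from_summary_py_alt (content : String) (provider : String) : String :=
  pvFindHeader (PySem.Str.upper provider) ((PySem.Str.split? content "\n").getD [])

-- ===== PRECONDITION & SPEC =====
def Spec_extract_score_from_summary_py (content : String) (provider : String) (out : String) : Prop := out = extract_score_from_summary_py_alt content provider
instance (content : String) (provider : String) (out : String) : Decidable (Spec_extract_score_from_summary_py content provider out) := by unfold Spec_extract_score_from_summary_py; infer_instance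

-- ===== CLAIM (what is proved, stated in full; the proofs are below) =====
def Claim_equal_extract_score_from_summary_py : Prop := ∀ (content : String) (provider : String), Dom_extract_score_from_summary_py content provider → Spec_extract_score_from_summary_py content provider (extract_score_from_summary_py content provider)

-- ===== LEMMAS AND PROOFS =====
theorem pvLoop_eq (provider : String) (ls : List String) :
    pvLoopA provider ls false = pvFindHeader (PySem.Str.upper provider) ls ∧
    pvLoopA provider ls true = pvScanBody (PySem.Str.upper provider) ls := by
  induction ls with
  | nil => exact ⟨rfl, rfl⟩
  | cons l ls ih =>
    constructor
    · rw [pvLoopA, pvFindHeader]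
      by_cases h : (PySem.Str.isIn (PySem.Str.upper provider) l && PySem.Str.isIn "EVALUATION" l) = true
      · rw [if_pos h, pvIsHeader, if_pos h]; exact ih.2
      · rw [if_neg h, pvIsHeader, if_neg h]
        simp only [Bool.false_and, Bool.false_eq_true, if_false]
        exact ih.1
    · rw [pvLoopA, pvScanBody]
      by_cases h1 : (PySem.Str.isIn (PySem.Str.upper provider) l && PySem.Str.isIn "EVALUATION" l) = true
      · rw [if_pos h1, pvIsHeader, if_pos h1]; exact ih.2
      rw [if_neg h1, pvIsHeader, if_neg h1]
      by_cases h2 : (PySem.Str.isIn "=" l && decide (10 < PySem.Str.len (PySem.Str.strip l)) &&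
          decide (10 < PySem.Str.count (PySem.Str.strip l) "=")) = true
      · rw [pvIsSep, if_pos h2]
        simp only [Bool.true_and, h2, if_true]
        exact ih.1
      rw [pvIsSep, if_neg h2]
      simp only [Bool.true_and, h2, Bool.false_eq_true, if_false]
      by_cases h3 : PySem.Str.isIn "Score:" l = true
      · rw [if_pos h3, pvScoreOf, if_pos h3]
        rcases hp : PySem.List.pyGet? ((PySem.Str.split? l "Score:").getD []) 1 with _ | part
        · simp only [hp]; exact ih.2
        · simp only [hp]
          rcases hq : PySem.List.pyGet? ((PySem.Str.split? (PySem.Str.strip part) "/").getD []) 0 with _ | score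
          · simp only [hq]; exact ih.2
          · simp only [hq]
      · rw [if_neg h3, pvScoreOf, if_neg h3]
        exact ih.2

-- ===== VERDICT (by name: the statement is the Claim_ definition above) =====
theorem extract_score_from_summary_py_spec : Claim_equal_extract_score_from_summary_py := by
  intro content provider _
  unfold Spec_extract_score_from_summary_py extract_score_from_summary_py extract_score_from_summary_py_alt
  exact (pvLoop_eq provider _).1
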